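-- pv_equiv track=rewrite | github.com/leeyjeen/TIL | problem-solving/baekjoon/step16/1003_피보나치_함수.py | result
-- ===== SOURCE A (Python) =====
-- def result(n):
--     zero_count = [1, 0]
--     one_count = [0, 1]
--     if n <= 1:
--         return zero_count, one_count
--     for i in range(2, n+1):
--         zero_count.append(zero_count[i-1]+zero_count[i-2])
--         one_count.append(one_count[i-1]+one_count[i-2])
--     return zero_count, one_count
-- ===== SOURCE B (Python) =====
-- def result(n):
--     one = [0, 1]
--     a, b = 0, 1
--     for _ in range(max(n, 1) - 1):
--         a, b = b, a + b
--         one.append(b)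
--     return [1] + one[:-1], one
-- ===== Notes on version B (the rewrite author's own statement) =====
-- stated objective: simpler
-- what changed: B runs a single pair-state loop (no list indexing) to build the one-count list and derives the zero-count list as [1] + one[:-1], instead of A's two index-based append loops over both lists.
import Mathlib
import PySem

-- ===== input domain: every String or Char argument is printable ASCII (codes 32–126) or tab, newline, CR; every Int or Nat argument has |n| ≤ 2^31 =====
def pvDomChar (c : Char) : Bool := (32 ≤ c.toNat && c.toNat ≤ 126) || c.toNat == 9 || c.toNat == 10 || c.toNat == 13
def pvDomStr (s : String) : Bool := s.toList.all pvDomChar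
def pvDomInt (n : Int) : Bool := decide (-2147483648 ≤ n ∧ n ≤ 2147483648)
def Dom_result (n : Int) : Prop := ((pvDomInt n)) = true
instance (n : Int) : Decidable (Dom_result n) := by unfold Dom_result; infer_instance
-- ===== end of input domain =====

-- B builds the one-count list with a single pair-state loop (no list indexing)
-- and derives the zero-count list as [1] + one[:-1]; same values as A, simpler decomposition.

-- ===== PORT A =====
-- loop body of A: append zero[i-1]+zero[i-2] and one[i-1]+one[i-2]
def stepA (st : List Int × List Int) (i : Int) : List Int × List Int :=
  (st.1 ++ [PySem.List.pyGetD st.1 (i - 1) 0 + PySem.List.pyGetD st.1 (i - 2) 0],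
   st.2 ++ [PySem.List.pyGetD st.2 (i - 1) 0 + PySem.List.pyGetD st.2 (i - 2) 0])

def result (n : Int) : List Int × List Int :=
  let zero_count : List Int := [1, 0]
  let one_count : List Int := [0, 1]
  if n ≤ 1 then (zero_count, one_count)
  else (PySem.List.pyRange 2 (n + 1) 1).foldl stepA (zero_count, one_count)

-- ===== PORT B =====
-- loop body of B: a, b = b, a+b; one.append(b)
def stepB (st : Int × Int × List Int) (_i : Int) : Int × Int × List Int :=
  (st.2.1, st.1 + st.2.1, st.2.2 ++ [st.1 + st.2.1])

def result_alt (n : Int) : List Int × List Int :=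
  let st := (PySem.List.pyRange 0 (max n 1 - 1) 1).foldl stepB (0, 1, [0, 1])
  let one := st.2.2
  ((1 : Int) :: PySem.List.slice one none (some (-1)), one)

-- ===== PRECONDITION & SPEC =====
def Spec_result (n : Int) (out : List Int × List Int) : Prop := out = result_alt n
instance (n : Int) (out : List Int × List Int) : Decidable (Spec_result n out) := by unfold Spec_result; infer_instance

-- ===== CLAIM (what is proved, stated in full; the proofs are below) =====
def Claim_equal_result : Prop := ∀ (n : Int), Dom_result n → Spec_result n (result n)

-- ===== LEMMAS AND PROOFS =====

theorem getD_concat_length (xs : List Int) (x d : Int) : (xs ++ [x]).getD xs.length d = x := by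
  simp [List.getD]

theorem getD_append_left (xs ys : List Int) (i : Nat) (h : i < xs.length) (d : Int) :
    (xs ++ ys).getD i d = xs.getD i d := by
  simp [List.getD, List.getElem?_append_left h]

-- joint loop invariant: after j iterations both loops hold lists of the shape
-- A-state = (1 :: p ++ [a], p ++ [a, b]), B-state = (a, b, p ++ [a, b]),
-- with |p| = j and the zero list's last two entries summing to b.
theorem inv (j : Nat) :
    ∃ (p : List Int) (a b : Int),
      p.length = j ∧
      (PySem.List.pyRange 2 ((j : Int) + 2) 1).foldl stepA ([1, 0], [0, 1])
        = (1 :: (p ++ [a]), (p ++ [a]) ++ [b]) ∧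
      (PySem.List.pyRange 0 (j : Int) 1).foldl stepB (0, 1, [0, 1])
        = (a, b, (p ++ [a]) ++ [b]) ∧
      (1 :: p).getD p.length 0 + a = b := by
  induction j with
  | zero =>
      exact ⟨[], 0, 1, rfl, by decide, by decide, by decide⟩
  | succ j ih =>
      obtain ⟨p, a, b, hl, hA, hB, hc⟩ := ih
      refine ⟨p ++ [a], b, a + b, by simp [hl], ?_, ?_, ?_⟩
      · push_cast
        rw [show ((j : Int) + 1 + 2) = ((j : Int) + 2) + 1 by ring,
           PySem.List.pyRange_one_succ_right (by omega), List.foldl_append, hA]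
        simp only [List.foldl_cons, List.foldl_nil, stepA]
        have i1 : ((j : Int) + 2) - 1 = ((j + 1 : Nat) : Int) := by push_cast; ring
        have i2 : ((j : Int) + 2) - 2 = ((j : Nat) : Int) := by ring
        rw [i1, i2, PySem.List.pyGetD_natCast, PySem.List.pyGetD_natCast,
           PySem.List.pyGetD_natCast, PySem.List.pyGetD_natCast]
        have z1 : (1 :: (p ++ [a])).getD (j + 1) 0 = a := by
          have := getD_concat_length (1 :: p) a 0
          simp only [List.length_cons, hl] at this
          exact this
        have z2 : (1 :: (p ++ [a])).getD j 0 = (1 :: p).getD p.length 0 := by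
          have := getD_append_left (1 :: p) [a] j (by simp [hl]) 0
          simpa [hl] using this
        have o1 : ((p ++ [a]) ++ [b]).getD (j + 1) 0 = b := by
          have := getD_concat_length (p ++ [a]) b 0
          simp only [List.length_append, List.length_cons, List.length_nil, hl] at this
          exact this
        have o2 : ((p ++ [a]) ++ [b]).getD j 0 = a := by
          have h1 := getD_append_left (p ++ [a]) [b] j (by simp [hl]) 0
          have h2 := getD_concat_length p a 0
          rw [h1, ← hl]
          exact h2
        rw [z1, z2, o1, o2]
        have : (1 :: p).getD p.length 0 = b - a := by omega
        rw [this, show a + (b - a) = b from by ring, show b + a = a + b from by ring]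
        simp
      · push_cast
        rw [PySem.List.pyRange_one_succ_right (by omega), List.foldl_append, hB]
        simp [stepB]
      · have := getD_concat_length (1 :: p) a 0
        simp only [List.length_cons, hl] at this ⊢
        rw [show (1 :: (p ++ [a])) = (1 :: p) ++ [a] from rfl]
        rw [show (p ++ [a]).length = p.length + 1 by simp, hl] at *
        rw [this]

-- ===== VERDICT (by name: the statement is the Claim_ definition above) =====
theorem result_spec : Claim_equal_result := by
  intro n _
  unfold Spec_result result result_alt
  by_cases hn : n ≤ 1
  · have hmax : max n 1 - 1 = 0 := by omega
    rw [hmax]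
    simp [hn, PySem.List.slice_to_neg_one, PySem.List.pyRange]
  · obtain ⟨p, a, b, hl, hA, hB, hc⟩ := inv (n - 1).toNat
    have hm : max n 1 = n := by omega
    have e1 : ((n - 1).toNat : Int) + 2 = n + 1 := by omega
    have e2 : ((n - 1).toNat : Int) = max n 1 - 1 := by rw [hm]; omega
    rw [e1] at hA
    rw [e2] at hB
    simp only [hn, hA, hB, ite_false]
    simp [PySem.List.slice_to_neg_one]
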